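-- pv_equiv track=rewrite | github.com/cassimpatel/advent-of-code-2016 | day11/solutions.py | all_okay
-- ===== SOURCE A (Python) =====
-- def all_okay(floor):
--     # check nothing fries nothing else
--     gens = [x for x in floor if x.endswith('G')]
--     if not gens:
--         return True
--
--     for x in floor:
--         if x.endswith('M') and x[:-1] + 'G' not in floor:
--             return False
--     return True
-- ===== SOURCE B (Python) =====
-- def all_okay(floor):
--     # one pass: build element -> (has generator, has chip), then judge per element
--     status = {}
--     for x in floor:
--         if x.endswith('G'):
--             status[x[:-1]] = (True, status.get(x[:-1], (False, False))[1])
--         elif x.endswith('M'):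
--             status[x[:-1]] = (status.get(x[:-1], (False, False))[0], True)
--     vals = list(status.values())
--     if not any(g for g, m in vals):
--         return True
--     return all(g for g, m in vals if m)
-- ===== Notes on version B (the rewrite author's own statement) =====
-- stated objective: alternative
-- what changed: Replaces the per-chip early-return loop that probes the floor list for each chip's generator by a single grouping pass building an element->(has_generator,has_chip) dict, after which the verdict is read off the dict values alone.
import Mathlib
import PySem

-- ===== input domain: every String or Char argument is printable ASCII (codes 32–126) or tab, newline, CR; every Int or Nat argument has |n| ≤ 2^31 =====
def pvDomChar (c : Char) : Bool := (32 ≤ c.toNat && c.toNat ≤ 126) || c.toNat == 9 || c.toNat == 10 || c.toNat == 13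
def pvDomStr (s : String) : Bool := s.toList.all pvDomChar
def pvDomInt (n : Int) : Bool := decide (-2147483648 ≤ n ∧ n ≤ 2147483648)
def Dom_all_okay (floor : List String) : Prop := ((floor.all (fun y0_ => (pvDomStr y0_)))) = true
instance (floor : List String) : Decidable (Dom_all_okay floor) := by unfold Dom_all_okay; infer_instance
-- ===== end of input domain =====

-- B replaces A's per-chip early-return scan of the floor list by ONE grouping pass that
-- builds an element -> (has generator, has chip) dict; the verdict is then read off the
-- dict values alone (no generator lookup per chip); objective: alternative.

-- ===== PORT A =====
-- the 'for x in floor: … return False' loop, early return = short-circuit recursion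
def allOkayLoop (floor : List String) : List String → Bool
  | [] => true
  | x :: rest =>
      if PySem.Str.endswith x "M" &&
         !(floor.contains (PySem.Str.slice x none (some (-1)) ++ "G")) then
        false
      else allOkayLoop floor rest

def all_okay (floor : List String) : Bool :=
  let gens := floor.filter (fun x => PySem.Str.endswith x "G")
  if gens.isEmpty then true
  else allOkayLoop floor floor

-- ===== PORT B =====
-- the loop body: status[x[:-1]] = updated (has_gen, has_chip) pair
def bStep (d : PySem.Dict String (Bool × Bool)) (x : String) : PySem.Dict String (Bool × Bool) :=
  if PySem.Str.endswith x "G" then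
    d.insert (PySem.Str.slice x none (some (-1)))
      (true, (d.getD (PySem.Str.slice x none (some (-1))) (false, false)).2)
  else if PySem.Str.endswith x "M" then
    d.insert (PySem.Str.slice x none (some (-1)))
      ((d.getD (PySem.Str.slice x none (some (-1))) (false, false)).1, true)
  else d

def all_okay_alt (floor : List String) : Bool :=
  let status := floor.foldl bStep PySem.Dict.empty
  let vals := status.values
  if !(vals.any (fun p => p.1)) then true
  else (vals.filter (fun p => p.2)).all (fun p => p.1)

-- ===== PRECONDITION & SPEC =====
def Spec_all_okay (floor : List String) (out : Bool) : Prop := out = all_okay_alt floor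
instance (floor : List String) (out : Bool) : Decidable (Spec_all_okay floor out) := by unfold Spec_all_okay; infer_instance

-- ===== CLAIM (what is proved, stated in full; the proofs are below) =====
def Claim_equal_all_okay : Prop := ∀ (floor : List String), Dom_all_okay floor → Spec_all_okay floor (all_okay floor)

-- ===== LEMMAS AND PROOFS =====

theorem toListG : "G".toList = ['G'] := by decide
theorem toListM : "M".toList = ['M'] := by decide

theorem endswith_iff_str (s t : String) :
    PySem.Str.endswith s t = true ↔ t.toList <:+ s.toList := by
  rw [PySem.Str.endswith_eq, PySem.Chars.endswith_iff]

theorem slice_neg_one_toList (s : String) :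
    (PySem.Str.slice s none (some (-1))).toList = s.toList.dropLast :=
  PySem.Str.slice_to_neg_one s

-- a string ending with 'G' is its name ++ "G" (likewise 'M')
theorem endsG_decomp (x : String) (h : PySem.Str.endswith x "G" = true) :
    PySem.Str.slice x none (some (-1)) ++ "G" = x := by
  rw [endswith_iff_str, toListG] at h
  obtain ⟨p, hp⟩ := h
  apply String.toList_inj.mp
  rw [String.toList_append, toListG, slice_neg_one_toList, ← hp]
  simp

theorem endsM_decomp (x : String) (h : PySem.Str.endswith x "M" = true) :
    PySem.Str.slice x none (some (-1)) ++ "M" = x := by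
  rw [endswith_iff_str, toListM] at h
  obtain ⟨p, hp⟩ := h
  apply String.toList_inj.mp
  rw [String.toList_append, toListM, slice_neg_one_toList, ← hp]
  simp

theorem appendG_ends (e : String) : PySem.Str.endswith (e ++ "G") "G" = true := by
  rw [endswith_iff_str, toListG, String.toList_append, toListG]
  exact ⟨e.toList, rfl⟩

theorem appendM_ends (e : String) : PySem.Str.endswith (e ++ "M") "M" = true := by
  rw [endswith_iff_str, toListM, String.toList_append, toListM]
  exact ⟨e.toList, rfl⟩

theorem appendG_inj (e n : String) : e ++ "G" = n ++ "G" ↔ e = n := by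
  constructor
  · intro h
    have := congrArg String.toList h
    simp only [String.toList_append, toListG] at this
    exact String.toList_inj.mp (List.append_cancel_right this)
  · intro h; rw [h]

theorem appendM_inj (e n : String) : e ++ "M" = n ++ "M" ↔ e = n := by
  constructor
  · intro h
    have := congrArg String.toList h
    simp only [String.toList_append, toListM] at this
    exact String.toList_inj.mp (List.append_cancel_right this)
  · intro h; rw [h]

theorem appendG_ne_appendM (e n : String) : e ++ "G" ≠ n ++ "M" := by
  intro h
  have := congrArg (fun s => s.toList.getLast?) h
  simp only [String.toList_append, toListG, toListM] at this
  simp at this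

-- what one loop step does to a lookup
theorem bStep_getD (d : PySem.Dict String (Bool × Bool)) (x e : String) :
    (bStep d x).getD e (false, false) =
      ((d.getD e (false, false)).1 || (x == e ++ "G"),
       (d.getD e (false, false)).2 || (x == e ++ "M")) := by
  unfold bStep
  by_cases hG : PySem.Str.endswith x "G" = true
  · rw [if_pos hG]
    have hx := endsG_decomp x hG
    rw [PySem.Dict.getD_insert]
    by_cases he : e = PySem.Str.slice x none (some (-1))
    · have h1 : (x == e ++ "G") = true := by simp [he, hx]
      have h2 : (x == e ++ "M") = false := by
        simp only [beq_eq_false_iff_ne, ne_eq]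
        rw [he, ← hx]
        exact appendG_ne_appendM _ _
      rw [if_pos he, h1, h2, he]
      simp
    · have h1 : (x == e ++ "G") = false := by
        simp only [beq_eq_false_iff_ne, ne_eq]
        intro hc
        rw [← hx] at hc
        exact he ((appendG_inj _ _).mp hc).symm
      have h2 : (x == e ++ "M") = false := by
        simp only [beq_eq_false_iff_ne, ne_eq]
        rw [← hx]
        exact appendG_ne_appendM _ _
      rw [if_neg he, h1, h2]
      simp
  · rw [if_neg hG]
    by_cases hM : PySem.Str.endswith x "M" = true
    · rw [if_pos hM]
      have hx := endsM_decomp x hM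
      rw [PySem.Dict.getD_insert]
      by_cases he : e = PySem.Str.slice x none (some (-1))
      · have h2 : (x == e ++ "M") = true := by simp [he, hx]
        have h1 : (x == e ++ "G") = false := by
          simp only [beq_eq_false_iff_ne, ne_eq]
          rw [he, ← hx]
          exact fun hc => appendG_ne_appendM _ _ hc.symm
        rw [if_pos he, h1, h2, he]
        simp
      · have h2 : (x == e ++ "M") = false := by
          simp only [beq_eq_false_iff_ne, ne_eq]
          intro hc
          rw [← hx] at hc
          exact he ((appendM_inj _ _).mp hc).symm
        have h1 : (x == e ++ "G") = false := by
          simp only [beq_eq_false_iff_ne, ne_eq]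
          rw [← hx]
          exact fun hc => appendG_ne_appendM _ _ hc.symm
        rw [if_neg he, h1, h2]
        simp
    · rw [if_neg hM]
      have h1 : (x == e ++ "G") = false := by
        simp only [beq_eq_false_iff_ne, ne_eq]
        intro hc
        exact hG (hc ▸ appendG_ends e)
      have h2 : (x == e ++ "M") = false := by
        simp only [beq_eq_false_iff_ne, ne_eq]
        intro hc
        exact hM (hc ▸ appendM_ends e)
      rw [h1, h2]
      simp

-- the dict after the whole loop: lookup = membership of e+"G" / e+"M" in the processed list
theorem build_getD (l : List String) (d : PySem.Dict String (Bool × Bool)) (e : String) :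
    (l.foldl bStep d).getD e (false, false) =
      ((d.getD e (false, false)).1 || l.contains (e ++ "G"),
       (d.getD e (false, false)).2 || l.contains (e ++ "M")) := by
  induction l generalizing d with
  | nil => simp
  | cons x rest ih =>
      rw [List.foldl_cons, ih, bStep_getD]
      simp [Bool.or_assoc, eq_comm, beq_eq_decide]

theorem bStep_keys_mem (d : PySem.Dict String (Bool × Bool)) (x e : String) :
    e ∈ (bStep d x).keys ↔ e ∈ d.keys ∨ x = e ++ "G" ∨ x = e ++ "M" := by
  unfold bStep
  by_cases hG : PySem.Str.endswith x "G" = true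
  · rw [if_pos hG, PySem.Dict.mem_keys_insert]
    have hx := endsG_decomp x hG
    constructor
    · rintro (he | he)
      · right; left; rw [he, hx]
      · left; exact he
    · rintro (he | he | he)
      · right; exact he
      · left
        rw [← hx] at he
        exact ((appendG_inj _ _).mp he).symm
      · exfalso
        rw [← hx] at he
        exact appendG_ne_appendM _ _ he
  · rw [if_neg hG]
    by_cases hM : PySem.Str.endswith x "M" = true
    · rw [if_pos hM, PySem.Dict.mem_keys_insert]
      have hx := endsM_decomp x hM
      constructor
      · rintro (he | he)
        · right; right; rw [he, hx]
        · left; exact he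
      · rintro (he | he | he)
        · right; exact he
        · exfalso
          rw [← hx] at he
          exact appendG_ne_appendM _ _ he.symm
        · left
          rw [← hx] at he
          exact ((appendM_inj _ _).mp he).symm
    · rw [if_neg hM]
      constructor
      · intro h; left; exact h
      · rintro (he | he | he)
        · exact he
        · exact absurd (he ▸ appendG_ends e) hG
        · exact absurd (he ▸ appendM_ends e) hM

theorem build_keys_mem (l : List String) (d : PySem.Dict String (Bool × Bool)) (e : String) :
    e ∈ (l.foldl bStep d).keys ↔ e ∈ d.keys ∨ (e ++ "G") ∈ l ∨ (e ++ "M") ∈ l := by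
  induction l generalizing d with
  | nil => simp
  | cons x rest ih =>
      rw [List.foldl_cons, ih, bStep_keys_mem]
      constructor
      · rintro ((h | h | h) | h | h)
        · left; exact h
        · right; left; rw [← h]; exact List.mem_cons_self
        · right; right; rw [← h]; exact List.mem_cons_self
        · right; left; exact List.mem_cons_of_mem _ h
        · right; right; exact List.mem_cons_of_mem _ h
      · rintro (h | h | h)
        · left; left; exact h
        · rcases List.mem_cons.mp h with h | h
          · left; right; left; exact h.symm
          · right; left; exact h
        · rcases List.mem_cons.mp h with h | h
          · left; right; right; exact h.symm
          · right; right; exact h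

theorem build_nodup_keys (l : List String) (d : PySem.Dict String (Bool × Bool))
    (hd : d.keys.Nodup) : (l.foldl bStep d).keys.Nodup := by
  induction l generalizing d with
  | nil => exact hd
  | cons x rest ih =>
      rw [List.foldl_cons]
      apply ih
      unfold bStep
      split_ifs <;> first | exact PySem.Dict.nodup_keys_insert _ _ _ hd | exact hd

-- the early-return loop of A is an 'all'
theorem loop_eq_all (floor l : List String) :
    allOkayLoop floor l =
      l.all (fun x => !(PySem.Str.endswith x "M" &&
        !(floor.contains (PySem.Str.slice x none (some (-1)) ++ "G")))) := by
  induction l with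
  | nil => rfl
  | cons x rest ih =>
      simp only [allOkayLoop, List.all_cons, ih]
      by_cases h : (PySem.Str.endswith x "M" &&
          !(floor.contains (PySem.Str.slice x none (some (-1)) ++ "G"))) = true
      · rw [if_pos h, h]; rfl
      · rw [if_neg h, eq_false_of_ne_true h]
        rfl

theorem all_okay_eq (floor : List String) : all_okay floor = all_okay_alt floor := by
  have hnd := build_nodup_keys floor PySem.Dict.empty (by simp)
  have hval : (floor.foldl bStep PySem.Dict.empty).values =
      (floor.foldl bStep PySem.Dict.empty).keys.map
        (fun k => (floor.foldl bStep PySem.Dict.empty).getD k (false, false)) :=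
    PySem.Dict.values_eq_map_keys _ hnd (false, false)
  have hgetD : ∀ e, (floor.foldl bStep PySem.Dict.empty).getD e (false, false) =
      (floor.contains (e ++ "G"), floor.contains (e ++ "M")) := by
    intro e; rw [build_getD]; simp
  have hkeys : ∀ e, e ∈ (floor.foldl bStep PySem.Dict.empty).keys ↔
      (e ++ "G") ∈ floor ∨ (e ++ "M") ∈ floor := by
    intro e; rw [build_keys_mem]; simp
  -- the two boolean tests of B, reread over floor
  have hany : ((floor.foldl bStep PySem.Dict.empty).values.any (fun p => p.1)) =
      floor.any (fun x => PySem.Str.endswith x "G") := by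
    rw [hval, List.any_map]
    apply Bool.coe_iff_coe.mp
    simp only [List.any_eq_true, Function.comp_apply]
    constructor
    · rintro ⟨e, he, hp⟩
      rw [hgetD] at hp
      simp only at hp
      refine ⟨e ++ "G", List.mem_of_elem_eq_true hp, ?_⟩
      exact appendG_ends e
    · rintro ⟨x, hx, hxG⟩
      refine ⟨PySem.Str.slice x none (some (-1)), ?_, ?_⟩
      · rw [hkeys]; left; rw [endsG_decomp x hxG]; exact hx
      · rw [hgetD]
        simp only
        rw [endsG_decomp x hxG]
        exact List.elem_eq_true_of_mem hx
  have hall : (((floor.foldl bStep PySem.Dict.empty).values.filter (fun p => p.2)).all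
        (fun p => p.1)) =
      floor.all (fun x => !(PySem.Str.endswith x "M" &&
        !(floor.contains (PySem.Str.slice x none (some (-1)) ++ "G")))) := by
    rw [hval, List.filter_map, List.all_map]
    apply Bool.coe_iff_coe.mp
    simp only [List.all_eq_true, Function.comp_apply, List.mem_filter]
    constructor
    · intro h x hx
      by_cases hxM : PySem.Str.endswith x "M" = true
      · have he : PySem.Str.slice x none (some (-1)) ∈
            (floor.foldl bStep PySem.Dict.empty).keys := by
          rw [hkeys]; right; rw [endsM_decomp x hxM]; exact hx
        have hm : ((floor.foldl bStep PySem.Dict.empty).getD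
            (PySem.Str.slice x none (some (-1))) (false, false)).2 = true := by
          rw [hgetD]
          simp only
          rw [endsM_decomp x hxM]
          exact List.elem_eq_true_of_mem hx
        have := h _ ⟨he, hm⟩
        rw [hgetD] at this
        simp only at this
        rw [hxM, this]
        simp
      · rw [eq_false_of_ne_true hxM]
        simp
    · intro h e he
      rw [hgetD] at he ⊢
      simp only at he ⊢
      obtain ⟨hek, hem⟩ := he
      have hx := h (e ++ "M") (List.mem_of_elem_eq_true hem)
      have hxM : PySem.Str.endswith (e ++ "M") "M" = true := appendM_ends e
      rw [hxM] at hx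
      simp only [Bool.true_and, Bool.not_eq_eq_eq_not, Bool.not_true] at hx
      have hsl : PySem.Str.slice (e ++ "M") none (some (-1)) = e := by
        apply String.toList_inj.mp
        rw [slice_neg_one_toList, String.toList_append, toListM]
        simp
      rw [hsl] at hx
      exact hx
  -- assemble
  unfold all_okay all_okay_alt
  simp only []
  rw [hany, hall]
  by_cases hge : (floor.filter (fun x => PySem.Str.endswith x "G")).isEmpty
  · rw [if_pos hge]
    have : floor.any (fun x => PySem.Str.endswith x "G") = false := by
      rw [List.isEmpty_iff, List.filter_eq_nil_iff] at hge
      simp only [List.any_eq_false]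
      intro x hx
      exact hge x hx
    rw [this]
    rfl
  · rw [if_neg hge]
    have : floor.any (fun x => PySem.Str.endswith x "G") = true := by
      rw [Bool.not_eq_true, List.isEmpty_eq_false_iff_exists_mem] at hge
      obtain ⟨a, ha⟩ := hge
      obtain ⟨ham, haG⟩ := List.mem_filter.mp ha
      exact List.any_eq_true.mpr ⟨a, ham, haG⟩
    rw [this, loop_eq_all]
    rfl

-- ===== VERDICT (by name: the statement is the Claim_ definition above) =====
theorem all_okay_spec : Claim_equal_all_okay := by
  intro floor _
  exact all_okay_eq floor
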